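-- pv_equiv track=rewrite | github.com/PageBot/PageBot | Lib/pagebot/toolbox/transformer.py | path2Url
-- ===== SOURCE A (Python) =====
-- def path2Url(path):
--     """Convert the path to a valid url, by removing spaces, other inconvenient
--     characers and set all to lowercase.
--
--     >>> path2Url('a/b/d/e/f/g hhh.html')
--     'a/b/d/e/f/g_hhh.html'
--     >>> path2Url('a/b b/f/g hhh.html')
--     'a/b_b/f/g_hhh.html'
--     >>> path2Url('a/b & b/f/g hhh.html')
--     'a/b_and_b/f/g_hhh.html'
--     """
--     replacing = ((' ','_'), ('&','and'), ('?', '_')) # TODO: Make better conversion here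
--     if path is not None:
--         path = path.lower()
--         for s1, s2 in replacing:
--             path = path.replace(s1, s2)
--         return path
--     return None
-- ===== SOURCE B (Python) =====
-- def path2Url(path):
--     if path is None:
--         return None
--     mapping = {' ': '_', '&': 'and', '?': '_'}
--     return ''.join(mapping.get(ch, ch) for ch in path.lower())
-- ===== Notes on version B (the rewrite author's own statement) =====
-- stated objective: idiomatic
-- what changed: Replaces three sequential full-string .replace passes with one character-level pass that maps each character of the lowercased path through a lookup table and joins the pieces once.
import Mathlib
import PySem

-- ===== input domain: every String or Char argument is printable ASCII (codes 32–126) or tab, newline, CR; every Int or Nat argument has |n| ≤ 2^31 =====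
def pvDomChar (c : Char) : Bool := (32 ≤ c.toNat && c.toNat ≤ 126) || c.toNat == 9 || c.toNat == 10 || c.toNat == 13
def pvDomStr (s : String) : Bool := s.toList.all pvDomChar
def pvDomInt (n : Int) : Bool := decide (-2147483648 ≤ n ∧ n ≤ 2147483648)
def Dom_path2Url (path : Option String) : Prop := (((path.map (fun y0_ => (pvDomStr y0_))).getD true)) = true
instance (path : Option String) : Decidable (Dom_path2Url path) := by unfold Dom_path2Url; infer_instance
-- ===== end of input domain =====

-- B replaces A's three sequential full-string .replace passes with a single character-level
-- pass through a lookup table, joined once (objective: idiomatic; same asymptotic cost).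


-- ===== PORT A =====
def path2Url (path : Option String) : Option String :=
  match path with
  | none => none
  | some p =>
    let p := PySem.Str.lower p
    let p := PySem.Str.replace p " " "_"
    let p := PySem.Str.replace p "&" "and"
    let p := PySem.Str.replace p "?" "_"
    some p

-- ===== PORT B =====
def path2Url_alt (path : Option String) : Option String :=
  match path with
  | none => none
  | some p =>
    let mapping : PySem.Dict Char String := ⟨[(' ', "_"), ('&', "and"), ('?', "_")]⟩
    some (PySem.Str.join "" ((PySem.Chars.lower p.toList).map
      (fun ch => mapping.getD ch (String.ofList [ch]))))

-- ===== PRECONDITION & SPEC =====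
def Spec_path2Url (path : Option String) (out : Option String) : Prop := out = path2Url_alt path
instance (path : Option String) (out : Option String) : Decidable (Spec_path2Url path out) := by unfold Spec_path2Url; infer_instance

-- ===== CLAIM (what is proved, stated in full; the proofs are below) =====
def Claim_equal_path2Url : Prop := ∀ (path : Option String), Dom_path2Url path → Spec_path2Url path (path2Url path)

-- ===== LEMMAS AND PROOFS =====

-- A's .replace with a single-character needle is a per-character flatMap.
lemma go_single (c : Char) (new : List Char) (l : List Char) :
    ∀ (fuel : Nat) (acc : List Char), l.length ≤ fuel →
    PySem.Chars.replace.go [c] new fuel l acc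
      = acc.reverse ++ l.flatMap (fun x => if x = c then new else [x]) := by
  induction l with
  | nil =>
    intro fuel acc _
    cases fuel <;> simp [PySem.Chars.replace.go]
  | cons x t ih =>
    intro fuel acc h
    cases fuel with
    | zero => simp at h
    | succ f =>
      simp only [PySem.Chars.replace.go]
      by_cases hx : x = c
      · subst hx
        simp [List.isPrefixOf, ih f _ (by simpa using h)]
      · have : List.isPrefixOf [c] (x :: t) = false := by
          simp [List.isPrefixOf]; intro hh; exact hx hh.symm
        simp [this, ih f _ (by simpa using h), hx]

lemma replace_single (c : Char) (new l : List Char) :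
    PySem.Chars.replace l [c] new = l.flatMap (fun x => if x = c then new else [x]) := by
  simp [PySem.Chars.replace, go_single c new l l.length [] le_rfl]

-- the per-character composition of A's three replacements equals B's table lookup
lemma pointwise (x : Char) :
    (if x = ' ' then ['_'] else [x]).flatMap
        (fun y => (if y = '&' then ['a', 'n', 'd'] else [y]).flatMap
          (fun z => if z = '?' then ['_'] else [z]))
      = ((PySem.Dict.mk [(' ', "_"), ('&', "and"), ('?', "_")]).getD x (String.ofList [x])).toList := by
  by_cases h1 : x = ' '
  · subst h1; decide
  · by_cases h2 : x = '&'
    · subst h2; decide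
    · by_cases h3 : x = '?'
      · subst h3; decide
      · have e1 : ((' ' : Char) == x) = false := beq_eq_false_iff_ne.mpr (fun h => h1 h.symm)
        have e2 : (('&' : Char) == x) = false := beq_eq_false_iff_ne.mpr (fun h => h2 h.symm)
        have e3 : (('?' : Char) == x) = false := beq_eq_false_iff_ne.mpr (fun h => h3 h.symm)
        simp [h1, h2, h3, PySem.Dict.getD, PySem.Dict.get?, e1, e2, e3]

-- ''.join(parts) is flatten
lemma join_nil_flatten (l : List (List Char)) : PySem.Chars.join [] l = l.flatten := by
  unfold PySem.Chars.join List.intercalate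
  induction l with
  | nil => rfl
  | cons x t ih =>
    cases t with
    | nil => rfl
    | cons y u => simpa [List.intersperse] using ih

-- ===== VERDICT (by name: the statement is the Claim_ definition above) =====
theorem path2Url_spec : Claim_equal_path2Url := by
  intro path _
  unfold Spec_path2Url path2Url path2Url_alt
  cases path with
  | none => rfl
  | some p =>
    refine congrArg some (String.toList_inj.mp ?_)
    have hA : (PySem.Str.replace
        (PySem.Str.replace (PySem.Str.replace (PySem.Str.lower p) " " "_") "&" "and")
        "?" "_").toList
      = PySem.Chars.replace
          (PySem.Chars.replace (PySem.Chars.replace (PySem.Chars.lower p.toList)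
            [' '] ['_']) ['&'] ['a', 'n', 'd']) ['?'] ['_'] := by
      rw [PySem.Str.toList_replace, PySem.Str.toList_replace, PySem.Str.toList_replace,
        PySem.Str.toList_lower]
      rfl
    rw [hA, replace_single, replace_single, replace_single,
      List.flatMap_assoc, List.flatMap_assoc, PySem.Str.toList_join]
    have hj : PySem.Chars.join "".toList
        (List.map (String.toList ∘ fun ch =>
          (PySem.Dict.mk [(' ', "_"), ('&', "and"), ('?', "_")]).getD ch (String.ofList [ch]))
          (PySem.Chars.lower p.toList))
      = (PySem.Chars.lower p.toList).flatMap (fun ch =>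
          ((PySem.Dict.mk [(' ', "_"), ('&', "and"), ('?', "_")]).getD ch
            (String.ofList [ch])).toList) := by
      rw [show "".toList = ([] : List Char) from rfl, join_nil_flatten,
        List.flatten_eq_flatMap, List.flatMap_map]
      rfl
    rw [List.map_map, hj]
    exact congrArg (fun f => List.flatMap f (PySem.Chars.lower p.toList)) (funext pointwise)
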